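/- GENERATED by farm/mkstatement.py from design/units.tsv (unit `codebook_decode_deinterleave_repeat.COMPOSITION`) and the Specs of Vorbis/Spec/*.lean — do not edit.
   THE STATEMENT of the proof unit `codebook_decode_deinterleave_repeat.COMPOSITION`: the function `codebook_decode_deinterleave_repeat` (219 instructions) satisfies its contract,
   GIVEN THE STATEMENTS OF ITS 7 SEGMENTS (`Vorbis.Spec.Deint.Claim<k> Lay μ u₀`: what the unit `codebook_decode_deinterleave_repeat.<k>` proves).
   No machine code is walked: `ReachVia.trans` along the segments (the exit assertion of a segment is the entry assertion of
   its successor), an induction on the loop measures. What the names mean: Vorbis/Spec/Basic.lean. The theorem to prove: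
   `theorem codebook_decode_deinterleave_repeat_COMPOSITION_ok : Vorbis.Spec.codebook_decode_deinterleave_repeat_COMPOSITION.Statement`. -/
import Vorbis.Spec.Codebook
import Vorbis.Spec.Codebook.Deint
namespace Vorbis.Spec.codebook_decode_deinterleave_repeat_COMPOSITION
open X86 X86.User Asan

/-- The statement of unit `codebook_decode_deinterleave_repeat.COMPOSITION`. -/
def Statement : Prop :=
  ∀ (Lay : Layout) (_hLay : Lay.hi = 0x1000000) (μ : Microarch) (_hμ : UserX.MicroOK μ) (u₀ : State)
    (_h_codebook_decode_deinterleave_repeat_1 : Vorbis.Spec.Deint.Claim1 Lay μ u₀)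
    (_h_codebook_decode_deinterleave_repeat_2 : Vorbis.Spec.Deint.Claim2 Lay μ u₀)
    (_h_codebook_decode_deinterleave_repeat_3 : Vorbis.Spec.Deint.Claim3 Lay μ u₀)
    (_h_codebook_decode_deinterleave_repeat_4 : Vorbis.Spec.Deint.Claim4 Lay μ u₀)
    (_h_codebook_decode_deinterleave_repeat_5 : Vorbis.Spec.Deint.Claim5 Lay μ u₀)
    (_h_codebook_decode_deinterleave_repeat_6 : Vorbis.Spec.Deint.Claim6 Lay μ u₀)
    (_h_codebook_decode_deinterleave_repeat_7 : Vorbis.Spec.Deint.Claim7 Lay μ u₀),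
    ∀ (others : List Obj) (frames : List (Nat × FrameLayout)) (Blk : Block → Prop) (len : Nat), Calls Lay μ Vorbis.WayInv (Vorbis.conv u₀) Vorbis.L.codebook_decode_deinterleave_repeat.entry (Vorbis.Spec.codebook_decode_deinterleave_repeat.spec others frames Blk len)

end Vorbis.Spec.codebook_decode_deinterleave_repeat_COMPOSITION
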